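-- pv_equiv track=rewrite | github.com/CIVITAS-John/vox-deorum-analysis | extract/utilities.py | filter_existing_data
-- ===== SOURCE A (Python) =====
-- def filter_existing_data(existing_data, available_game_ids):
--     """
--     Filter existing data to keep only games that still have database files.
--
--     Args:
--         existing_data: List of existing data rows
--         available_game_ids: Set of game IDs that have database files
--
--     Returns:
--         tuple: (filtered data list, set of kept game IDs, number of pruned rows, set of pruned game IDs)
--     """
--     filtered_data = []
--     kept_game_ids = set()
--     pruned_rows = 0
--     pruned_game_ids = set()
--
--     for row in existing_data:
--         game_id = row.get('game_id')
--         if game_id and game_id != 'N/A':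
--             if game_id in available_game_ids:
--                 filtered_data.append(row)
--                 kept_game_ids.add(game_id)
--             else:
--                 pruned_rows += 1
--                 pruned_game_ids.add(game_id)
--         else:
--             # Keep rows with N/A game_id (shouldn't normally happen but be safe)
--             filtered_data.append(row)
--
--     return filtered_data, kept_game_ids, pruned_rows, pruned_game_ids
-- ===== SOURCE B (Python) =====
-- def filter_existing_data(existing_data, available_game_ids):
--     """Same result as A, recast as independent comprehension passes over the rows."""
--     def valid_id(row):
--         g = row.get('game_id')
--         return g if g and g != 'N/A' else None
--
--     filtered_data = [r for r in existing_data
--                      if valid_id(r) is None or valid_id(r) in available_game_ids]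
--     kept_game_ids = {valid_id(r) for r in existing_data
--                      if valid_id(r) is not None and valid_id(r) in available_game_ids}
--     pruned = [valid_id(r) for r in existing_data
--               if valid_id(r) is not None and valid_id(r) not in available_game_ids]
--     return filtered_data, kept_game_ids, len(pruned), set(pruned)
-- ===== Notes on version B (the rewrite author's own statement) =====
-- stated objective: simpler
-- what changed: Replaces the single loop with four mutable accumulators and nested branches by four independent single-predicate comprehension passes (filter, two set comprehensions, a count), each derived from one helper valid_id.
import Mathlib
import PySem

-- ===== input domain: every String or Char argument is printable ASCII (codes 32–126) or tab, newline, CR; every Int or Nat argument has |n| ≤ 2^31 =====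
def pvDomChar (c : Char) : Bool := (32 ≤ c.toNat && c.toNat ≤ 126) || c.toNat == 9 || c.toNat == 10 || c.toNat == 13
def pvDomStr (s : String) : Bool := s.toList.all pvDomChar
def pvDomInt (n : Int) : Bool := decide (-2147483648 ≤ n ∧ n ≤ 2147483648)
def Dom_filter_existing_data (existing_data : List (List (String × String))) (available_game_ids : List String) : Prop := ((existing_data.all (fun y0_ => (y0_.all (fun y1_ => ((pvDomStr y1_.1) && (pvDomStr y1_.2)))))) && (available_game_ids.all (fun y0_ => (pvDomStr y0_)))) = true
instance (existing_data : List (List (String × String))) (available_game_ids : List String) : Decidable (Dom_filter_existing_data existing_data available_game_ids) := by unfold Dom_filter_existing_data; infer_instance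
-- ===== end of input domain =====

-- B recasts A's single accumulator loop as independent single-predicate passes (filter / set comprehensions / a count); objective: simpler.


-- ===== PORT A =====
-- the loop body: state (filtered_data, kept_game_ids, pruned_rows, pruned_game_ids)
def pvStepA (available_game_ids : List String)
    (st : (List (List (String × String))) × PySem.Set String × Int × PySem.Set String)
    (row : List (String × String)) :
    (List (List (String × String))) × PySem.Set String × Int × PySem.Set String :=
  let (f, k, n, p) := st
  match row.lookup "game_id" with     -- row.get('game_id'): first-match assoc lookup
  | some g =>
    if g ≠ "" && g ≠ "N/A" then       -- 'game_id and game_id != "N/A"'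
      if PySem.Set.contains available_game_ids g then (f ++ [row], PySem.Set.add k g, n, p)
      else (f, k, n + 1, PySem.Set.add p g)
    else (f ++ [row], k, n, p)
  | none => (f ++ [row], k, n, p)

def filter_existing_data (existing_data : List (List (String × String))) (available_game_ids : List String) : (List (List (String × String))) × List String × Int × List String :=
  existing_data.foldl (pvStepA available_game_ids) ([], PySem.Set.empty, 0, PySem.Set.empty)

-- ===== PORT B =====
-- valid_id(row): Some g when game_id is present, non-empty and ≠ 'N/A'
def pvValidId (row : List (String × String)) : Option String :=
  match row.lookup "game_id" with
  | some g => if g ≠ "" && g ≠ "N/A" then some g else none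
  | none => none

def filter_existing_data_alt (existing_data : List (List (String × String))) (available_game_ids : List String) : (List (List (String × String))) × List String × Int × List String :=
  let filtered_data := existing_data.filter (fun r =>
    match pvValidId r with
    | none => true
    | some g => PySem.Set.contains available_game_ids g)
  let kept_game_ids := PySem.Set.ofList (existing_data.filterMap (fun r =>
    match pvValidId r with
    | some g => if PySem.Set.contains available_game_ids g then some g else none
    | none => none))
  let pruned := existing_data.filterMap (fun r =>
    match pvValidId r with
    | some g => if PySem.Set.contains available_game_ids g then none else some g
    | none => none)
  (filtered_data, kept_game_ids, (pruned.length : Int), PySem.Set.ofList pruned)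

-- ===== PRECONDITION & SPEC =====
def Spec_filter_existing_data (existing_data : List (List (String × String))) (available_game_ids : List String) (out : (List (List (String × String))) × List String × Int × List String) : Prop := out = filter_existing_data_alt existing_data available_game_ids
instance (existing_data : List (List (String × String))) (available_game_ids : List String) (out : (List (List (String × String))) × List String × Int × List String) : Decidable (Spec_filter_existing_data existing_data available_game_ids out) := by unfold Spec_filter_existing_data; infer_instance

-- ===== CLAIM (what is proved, stated in full; the proofs are below) =====
def Claim_equal_filter_existing_data : Prop := ∀ (existing_data : List (List (String × String))) (available_game_ids : List String), Dom_filter_existing_data existing_data available_game_ids → Spec_filter_existing_data existing_data available_game_ids (filter_existing_data existing_data available_game_ids)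

-- ===== LEMMAS AND PROOFS =====
-- A's loop body expressed through B's helper pvValidId
lemma pvStepA_eq (avail : List String) (f : List (List (String × String)))
    (k : PySem.Set String) (n : Int) (p : PySem.Set String) (r : List (String × String)) :
    pvStepA avail (f, k, n, p) r =
      match pvValidId r with
      | some g => if PySem.Set.contains avail g then (f ++ [r], PySem.Set.add k g, n, p)
                  else (f, k, n + 1, PySem.Set.add p g)
      | none => (f ++ [r], k, n, p) := by
  unfold pvStepA pvValidId
  rcases r.lookup "game_id" with _ | g
  · rfl
  · by_cases h1 : g = "" <;> by_cases h2 : g = "N/A" <;> simp [h1, h2]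

-- loop invariant: A's fold from an arbitrary state, expressed through B's passes
lemma pvLoopA_inv (avail : List String) (rows : List (List (String × String)))
    (f : List (List (String × String))) (k : PySem.Set String) (n : Int) (p : PySem.Set String) :
    rows.foldl (pvStepA avail) (f, k, n, p) =
      (f ++ rows.filter (fun r =>
          match pvValidId r with
          | none => true
          | some g => PySem.Set.contains avail g),
       PySem.Set.update k (rows.filterMap (fun r =>
          match pvValidId r with
          | some g => if PySem.Set.contains avail g then some g else none
          | none => none)),
       n + ((rows.filterMap (fun r =>
          match pvValidId r with
          | some g => if PySem.Set.contains avail g then none else some g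
          | none => none)).length : Int),
       PySem.Set.update p (rows.filterMap (fun r =>
          match pvValidId r with
          | some g => if PySem.Set.contains avail g then none else some g
          | none => none))) := by
  induction rows generalizing f k n p with
  | nil => simp [PySem.Set.update]
  | cons r rows ih =>
    rw [List.foldl_cons, pvStepA_eq]
    rcases hv : pvValidId r with _ | g
    · simp [ih, hv]
    · by_cases ha : g ∈ avail
      · simp [ih, hv, ha, PySem.Set.update, PySem.Set.contains]
      · simp [ih, hv, ha, PySem.Set.update, PySem.Set.contains]
        omega

-- ===== VERDICT (by name: the statement is the Claim_ definition above) =====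
theorem filter_existing_data_spec : Claim_equal_filter_existing_data := by
  intro ed avail _
  show filter_existing_data ed avail = filter_existing_data_alt ed avail
  rw [filter_existing_data, filter_existing_data_alt, pvLoopA_inv]
  simp [PySem.Set.ofList_eq_foldl, PySem.Set.update, PySem.Set.empty]
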